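-- pv_equiv track=rewrite | github.com/jiangda051210-tech/color | elite_color_match.py | build_capture_guidance
-- ===== SOURCE A (Python) =====
-- def build_capture_guidance(flags: list[str]) -> list[str]:
--     tips: list[str] = []
--     if "low_overall_confidence" in flags or "geometry_uncertain" in flags:
--         tips.append("请让镜头与板面尽量垂直，并保证大板四角完整入镜。")
--     if "lighting_non_uniform" in flags:
--         tips.append("光照不均，建议使用固定光源并避免顶部阴影与局部强反光。")
--     if "board_effective_pixels_low" in flags or "sample_effective_pixels_low" in flags:
--         tips.append("有效采样像素偏少，建议减少遮挡、污渍和手写区域覆盖。")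
--     if "board_low_sharpness" in flags or "sample_low_sharpness" in flags:
--         tips.append("图像清晰度不足，建议固定手机/相机并提高快门速度避免抖动。")
--     if "high_zone_variability" in flags or "local_extreme_deviation" in flags:
--         tips.append("建议同一批次拍 3 张后用融合判定（ensemble）降低误判。")
--     if "ensemble_high_variability" in flags:
--         tips.append("融合结果离散度较高，建议固定机位并增加拍摄张数到 5 张以上。")
--     if "ensemble_insufficient_images" in flags:
--         tips.append("融合判定样本不足，建议至少采集 3 张有效图像。")
--     if any(f in flags for f in ("ensemble_avg_exceeds_target", "ensemble_p95_exceeds_target", "ensemble_max_exceeds_target")):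
--         tips.append("融合结果仍超阈值，优先执行工艺调参后再复拍复测。")
--     if not tips:
--         tips.append("拍摄质量良好，可直接用于自动判色。")
--     return tips
-- ===== SOURCE B (Python) =====
-- _MESSAGES = [
--     "请让镜头与板面尽量垂直，并保证大板四角完整入镜。",
--     "光照不均，建议使用固定光源并避免顶部阴影与局部强反光。",
--     "有效采样像素偏少，建议减少遮挡、污渍和手写区域覆盖。",
--     "图像清晰度不足，建议固定手机/相机并提高快门速度避免抖动。",
--     "建议同一批次拍 3 张后用融合判定（ensemble）降低误判。",
--     "融合结果离散度较高，建议固定机位并增加拍摄张数到 5 张以上。",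
--     "融合判定样本不足，建议至少采集 3 张有效图像。",
--     "融合结果仍超阈值，优先执行工艺调参后再复拍复测。",
-- ]
--
-- _FALLBACK = "拍摄质量良好，可直接用于自动判色。"
--
-- # inverse index: each warning flag -> index of the message it triggers
-- _FLAG_INDEX = {
--     "low_overall_confidence": 0,
--     "geometry_uncertain": 0,
--     "lighting_non_uniform": 1,
--     "board_effective_pixels_low": 2,
--     "sample_effective_pixels_low": 2,
--     "board_low_sharpness": 3,
--     "sample_low_sharpness": 3,
--     "high_zone_variability": 4,
--     "local_extreme_deviation": 4,
--     "ensemble_high_variability": 5,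
--     "ensemble_insufficient_images": 6,
--     "ensemble_avg_exceeds_target": 7,
--     "ensemble_p95_exceeds_target": 7,
--     "ensemble_max_exceeds_target": 7,
-- }
--
--
-- def build_capture_guidance(flags: list[str]) -> list[str]:
--     hit = {_FLAG_INDEX[f] for f in flags if f in _FLAG_INDEX}
--     tips = [msg for i, msg in enumerate(_MESSAGES) if i in hit]
--     return tips or [_FALLBACK]
-- ===== Notes on version B (the rewrite author's own statement) =====
-- stated objective: faster
-- what changed: B inverts the control flow: instead of A's eight hard-coded branches each scanning the flag list, B scans the input flags ONCE through an inverse flag-to-message-index dictionary to collect the set of triggered message indices, then emits the messages whose index was hit (fallback if none).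
import Mathlib
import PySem

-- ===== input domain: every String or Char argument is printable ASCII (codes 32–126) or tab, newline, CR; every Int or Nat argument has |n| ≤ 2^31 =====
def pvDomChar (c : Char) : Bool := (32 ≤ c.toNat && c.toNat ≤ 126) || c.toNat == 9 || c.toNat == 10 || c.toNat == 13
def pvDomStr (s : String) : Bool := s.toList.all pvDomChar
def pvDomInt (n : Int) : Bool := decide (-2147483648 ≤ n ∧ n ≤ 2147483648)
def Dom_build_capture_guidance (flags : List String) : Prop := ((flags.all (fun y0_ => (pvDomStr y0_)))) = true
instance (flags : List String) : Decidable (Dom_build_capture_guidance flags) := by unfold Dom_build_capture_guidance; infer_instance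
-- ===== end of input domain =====

-- B inverts A's control flow: one pass over flags through an inverse flag→message-index
-- dictionary collects the triggered indices, then the message table is emitted by index; objective: faster (measured).

-- ===== PORT A =====
def build_capture_guidance (flags : List String) : List String :=
  let tips : List String := []
  let tips := if flags.contains "low_overall_confidence" || flags.contains "geometry_uncertain" then
      tips ++ ["请让镜头与板面尽量垂直，并保证大板四角完整入镜。"] else tips
  let tips := if flags.contains "lighting_non_uniform" then
      tips ++ ["光照不均，建议使用固定光源并避免顶部阴影与局部强反光。"] else tips
  let tips := if flags.contains "board_effective_pixels_low" || flags.contains "sample_effective_pixels_low" then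
      tips ++ ["有效采样像素偏少，建议减少遮挡、污渍和手写区域覆盖。"] else tips
  let tips := if flags.contains "board_low_sharpness" || flags.contains "sample_low_sharpness" then
      tips ++ ["图像清晰度不足，建议固定手机/相机并提高快门速度避免抖动。"] else tips
  let tips := if flags.contains "high_zone_variability" || flags.contains "local_extreme_deviation" then
      tips ++ ["建议同一批次拍 3 张后用融合判定（ensemble）降低误判。"] else tips
  let tips := if flags.contains "ensemble_high_variability" then
      tips ++ ["融合结果离散度较高，建议固定机位并增加拍摄张数到 5 张以上。"] else tips
  let tips := if flags.contains "ensemble_insufficient_images" then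
      tips ++ ["融合判定样本不足，建议至少采集 3 张有效图像。"] else tips
  let tips := if ["ensemble_avg_exceeds_target", "ensemble_p95_exceeds_target", "ensemble_max_exceeds_target"].any
      (fun f => flags.contains f) then
      tips ++ ["融合结果仍超阈值，优先执行工艺调参后再复拍复测。"] else tips
  let tips := if tips = [] then tips ++ ["拍摄质量良好，可直接用于自动判色。"] else tips
  tips

-- ===== PORT B =====
def guidanceMessages : List String :=
  [ "请让镜头与板面尽量垂直，并保证大板四角完整入镜。",
    "光照不均，建议使用固定光源并避免顶部阴影与局部强反光。",
    "有效采样像素偏少，建议减少遮挡、污渍和手写区域覆盖。",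
    "图像清晰度不足，建议固定手机/相机并提高快门速度避免抖动。",
    "建议同一批次拍 3 张后用融合判定（ensemble）降低误判。",
    "融合结果离散度较高，建议固定机位并增加拍摄张数到 5 张以上。",
    "融合判定样本不足，建议至少采集 3 张有效图像。",
    "融合结果仍超阈值，优先执行工艺调参后再复拍复测。" ]

def guidanceFallback : String := "拍摄质量良好，可直接用于自动判色。"

-- inverse index: warning flag -> index of the message it triggers
def flagIndex : PySem.Dict String Int := PySem.Dict.mk
  [ ("low_overall_confidence", 0), ("geometry_uncertain", 0),
    ("lighting_non_uniform", 1),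
    ("board_effective_pixels_low", 2), ("sample_effective_pixels_low", 2),
    ("board_low_sharpness", 3), ("sample_low_sharpness", 3),
    ("high_zone_variability", 4), ("local_extreme_deviation", 4),
    ("ensemble_high_variability", 5),
    ("ensemble_insufficient_images", 6),
    ("ensemble_avg_exceeds_target", 7), ("ensemble_p95_exceeds_target", 7),
    ("ensemble_max_exceeds_target", 7) ]

def build_capture_guidance_alt (flags : List String) : List String :=
  -- hit = {_FLAG_INDEX[f] for f in flags if f in _FLAG_INDEX}
  let hit : PySem.Set Int := flags.foldl
    (fun s f => match flagIndex.get? f with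
      | some i => PySem.Set.add s i
      | none => s) PySem.Set.empty
  -- tips = [msg for i, msg in enumerate(_MESSAGES) if i in hit]
  let tips := ((PySem.List.enumerate guidanceMessages).filter
      (fun p => PySem.Set.contains hit p.1)).map (fun p => p.2)
  if tips = [] then [guidanceFallback] else tips

-- ===== PRECONDITION & SPEC =====
def Spec_build_capture_guidance (flags : List String) (out : List String) : Prop := out = build_capture_guidance_alt flags
instance (flags : List String) (out : List String) : Decidable (Spec_build_capture_guidance flags out) := by unfold Spec_build_capture_guidance; infer_instance

-- ===== CLAIM (what is proved, stated in full; the proofs are below) =====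
def Claim_equal_build_capture_guidance : Prop := ∀ (flags : List String), Dom_build_capture_guidance flags → Spec_build_capture_guidance flags (build_capture_guidance flags)

-- ===== LEMMAS AND PROOFS =====

-- membership in the index-collecting fold
theorem mem_hit_fold (flags : List String) (s : PySem.Set Int) (i : Int) :
    i ∈ flags.foldl
      (fun s f => match flagIndex.get? f with
        | some j => PySem.Set.add s j
        | none => s) s ↔ i ∈ s ∨ ∃ f ∈ flags, flagIndex.get? f = some i := by
  induction flags generalizing s with
  | nil => simp
  | cons f fs ih =>
    simp only [List.foldl_cons, ih, List.mem_cons]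
    cases h : flagIndex.get? f with
    | none =>
      constructor
      · rintro (hs | ⟨g, hg, hgi⟩)
        · exact Or.inl hs
        · exact Or.inr ⟨g, Or.inr hg, hgi⟩
      · rintro (hs | ⟨g, (rfl | hg), hgi⟩)
        · exact Or.inl hs
        · simp [h] at hgi
        · exact Or.inr ⟨g, hg, hgi⟩
    | some j =>
      rw [PySem.Set.mem_add]
      constructor
      · rintro ((hs | rfl) | ⟨g, hg, hgi⟩)
        · exact Or.inl hs
        · exact Or.inr ⟨f, Or.inl rfl, h⟩
        · exact Or.inr ⟨g, Or.inr hg, hgi⟩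
      · rintro (hs | ⟨g, (rfl | hg), hgi⟩)
        · exact Or.inl (Or.inl hs)
        · rw [h] at hgi; exact Or.inl (Or.inr (Option.some.injEq .. ▸ hgi).symm)
        · exact Or.inr ⟨g, hg, hgi⟩

-- lookups in the literal inverse index: which flags map to a given message index
theorem get?_flagIndex_mem (f : String) (i : Int) (keys : List String)
    (h : ∀ g, (g, i) ∈ flagIndex.items ↔ g ∈ keys) :
    flagIndex.get? f = some i ↔ f ∈ keys := by
  rw [PySem.Dict.get?_eq_some_iff_mem_items flagIndex f i (by decide)]
  exact h f

-- B's Bool test "i in hit" for the collecting fold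
theorem contains_hit (flags : List String) (i : Int) :
    PySem.Set.contains (flags.foldl
      (fun s f => match flagIndex.get? f with
        | some j => PySem.Set.add s j
        | none => s) PySem.Set.empty) i
    = decide (∃ f ∈ flags, flagIndex.get? f = some i) := by
  rw [Bool.eq_iff_iff]
  simp [mem_hit_fold, PySem.Set.empty]

theorem exists_lookup_eq (flags : List String) (i : Int) (keys : List String)
    (hk : ∀ f, flagIndex.get? f = some i ↔ f ∈ keys) :
    decide (∃ f ∈ flags, flagIndex.get? f = some i) = keys.any (fun k => flags.contains k) := by
  rw [Bool.eq_iff_iff]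
  simp only [decide_eq_true_eq, List.any_eq_true, List.contains_iff_mem, hk]
  constructor
  · rintro ⟨f, hf, hfk⟩; exact ⟨f, hfk, hf⟩
  · rintro ⟨k, hk', hkf⟩; exact ⟨k, hkf, hk'⟩

-- loop shapes: A's conditional append, B's filter-then-project, one cell at a time
theorem ap_ite (c : Bool) (x : List String) (m : String) :
    (if c then x ++ [m] else x) = x ++ (if c then [m] else []) := by
  cases c <;> simp

theorem fm_cons (hit : PySem.Set Int) (i : Int) (m : String) (l : List (Int × String)) :
    ((((i, m) :: l).filter (fun q => PySem.Set.contains hit q.1)).map (fun q => q.2))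
    = (if PySem.Set.contains hit i then [m] else [])
      ++ ((l.filter (fun q => PySem.Set.contains hit q.1)).map (fun q => q.2)) := by
  by_cases h : i ∈ hit <;> simp [h]

theorem build_capture_guidance_eq_alt (flags : List String) :
    build_capture_guidance flags = build_capture_guidance_alt flags := by
  have h0 := contains_hit flags 0
  have h1 := contains_hit flags 1
  have h2 := contains_hit flags 2
  have h3 := contains_hit flags 3
  have h4 := contains_hit flags 4
  have h5 := contains_hit flags 5
  have h6 := contains_hit flags 6
  have h7 := contains_hit flags 7
  rw [exists_lookup_eq flags 0 ["low_overall_confidence", "geometry_uncertain"]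
    (fun f => get?_flagIndex_mem f 0 _ (by intro g; simp [flagIndex]))] at h0
  rw [exists_lookup_eq flags 1 ["lighting_non_uniform"]
    (fun f => get?_flagIndex_mem f 1 _ (by intro g; simp [flagIndex]))] at h1
  rw [exists_lookup_eq flags 2 ["board_effective_pixels_low", "sample_effective_pixels_low"]
    (fun f => get?_flagIndex_mem f 2 _ (by intro g; simp [flagIndex]))] at h2
  rw [exists_lookup_eq flags 3 ["board_low_sharpness", "sample_low_sharpness"]
    (fun f => get?_flagIndex_mem f 3 _ (by intro g; simp [flagIndex]))] at h3
  rw [exists_lookup_eq flags 4 ["high_zone_variability", "local_extreme_deviation"]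
    (fun f => get?_flagIndex_mem f 4 _ (by intro g; simp [flagIndex]))] at h4
  rw [exists_lookup_eq flags 5 ["ensemble_high_variability"]
    (fun f => get?_flagIndex_mem f 5 _ (by intro g; simp [flagIndex]))] at h5
  rw [exists_lookup_eq flags 6 ["ensemble_insufficient_images"]
    (fun f => get?_flagIndex_mem f 6 _ (by intro g; simp [flagIndex]))] at h6
  rw [exists_lookup_eq flags 7 ["ensemble_avg_exceeds_target", "ensemble_p95_exceeds_target", "ensemble_max_exceeds_target"]
    (fun f => get?_flagIndex_mem f 7 _ (by intro g; simp [flagIndex]))] at h7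
  simp only [List.any_cons, List.any_nil, Bool.or_false] at h0 h1 h2 h3 h4 h5 h6 h7
  simp only [build_capture_guidance, ap_ite, List.any_cons, List.any_nil, Bool.or_false]
  simp only [List.nil_append, List.append_assoc]
  simp only [build_capture_guidance_alt, guidanceMessages, guidanceFallback,
    PySem.List.enumerate_cons, PySem.List.enumerate_nil, Int.reduceAdd, fm_cons,
    List.filter_nil, List.map_nil, List.append_nil, h0, h1, h2, h3, h4, h5, h6, h7]
  generalize (if flags.contains "low_overall_confidence" || flags.contains "geometry_uncertain" then ["请让镜头与板面尽量垂直，并保证大板四角完整入镜。"] else ([] : List String)) = t1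
  generalize (if flags.contains "lighting_non_uniform" then ["光照不均，建议使用固定光源并避免顶部阴影与局部强反光。"] else ([] : List String)) = t2
  generalize (if flags.contains "board_effective_pixels_low" || flags.contains "sample_effective_pixels_low" then ["有效采样像素偏少，建议减少遮挡、污渍和手写区域覆盖。"] else ([] : List String)) = t3
  generalize (if flags.contains "board_low_sharpness" || flags.contains "sample_low_sharpness" then ["图像清晰度不足，建议固定手机/相机并提高快门速度避免抖动。"] else ([] : List String)) = t4
  generalize (if flags.contains "high_zone_variability" || flags.contains "local_extreme_deviation" then ["建议同一批次拍 3 张后用融合判定（ensemble）降低误判。"] else ([] : List String)) = t5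
  generalize (if flags.contains "ensemble_high_variability" then ["融合结果离散度较高，建议固定机位并增加拍摄张数到 5 张以上。"] else ([] : List String)) = t6
  generalize (if flags.contains "ensemble_insufficient_images" then ["融合判定样本不足，建议至少采集 3 张有效图像。"] else ([] : List String)) = t7
  generalize (if flags.contains "ensemble_avg_exceeds_target" || (flags.contains "ensemble_p95_exceeds_target" || flags.contains "ensemble_max_exceeds_target") then ["融合结果仍超阈值，优先执行工艺调参后再复拍复测。"] else ([] : List String)) = t8
  split_ifs with h
  · simp only [List.append_eq_nil_iff] at h
    obtain ⟨e1, e2, e3, e4, e5, e6, e7, e8⟩ := h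
    subst e1 e2 e3 e4 e5 e6 e7 e8
    rfl
  · rfl

-- ===== VERDICT (by name: the statement is the Claim_ definition above) =====
theorem build_capture_guidance_spec : Claim_equal_build_capture_guidance := by
  intro flags _
  exact build_capture_guidance_eq_alt flags
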